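-- pv_equiv track=rewrite | github.com/marko2025pt/strategic_radar | agent/nodes.py | _is_duplicate_title
-- ===== SOURCE A (Python) =====
-- def _is_duplicate_title(title: str, seen_titles: list[str], threshold: int = 4) -> bool:
--     """
--     Returns True if `title` shares >= threshold meaningful words with any seen title.
--     Used only on small lists (< 20 items) so O(n) is fine.
--     """
--     stop = {
--         "the","a","an","of","in","for","to","and","or","on","at","by",
--         "with","is","are","its","as","that","this"
--     }
--     def words(t):
--         return {w.lower().strip(".,:-") for w in t.split() if w.lower() not in stop}
--     candidate = words(title)
--     for seen in seen_titles:
--         if len(candidate & words(seen)) >= threshold: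
--             return True
--     return False
-- ===== SOURCE B (Python) =====
-- def _is_duplicate_title(title: str, seen_titles: list[str], threshold: int = 4) -> bool:
--     stop = {
--         "the","a","an","of","in","for","to","and","or","on","at","by",
--         "with","is","are","its","as","that","this"
--     }
--     def words(t):
--         return {w.lower().strip(".,:-") for w in t.split() if w.lower() not in stop}
--     # inverted index: word -> list of seen-title indices containing it
--     index = {}
--     for idx, seen in enumerate(seen_titles):
--         for w in words(seen):
--             index.setdefault(w, []).append(idx)
--     # word-major counting: counts[i] = |words(title) & words(seen_titles[i])|
--     counts = [0] * len(seen_titles)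
--     for w in words(title):
--         for idx in index.get(w, []):
--             counts[idx] += 1
--     return any(c >= threshold for c in counts)
-- ===== Notes on version B (the rewrite author's own statement) =====
-- stated objective: alternative
-- what changed: Replaces A's per-seen-title set intersections with a prebuilt inverted index (word -> seen-title indices) and word-major counting over the candidate's words, then checks whether any per-title count reaches the threshold.
import Mathlib
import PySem

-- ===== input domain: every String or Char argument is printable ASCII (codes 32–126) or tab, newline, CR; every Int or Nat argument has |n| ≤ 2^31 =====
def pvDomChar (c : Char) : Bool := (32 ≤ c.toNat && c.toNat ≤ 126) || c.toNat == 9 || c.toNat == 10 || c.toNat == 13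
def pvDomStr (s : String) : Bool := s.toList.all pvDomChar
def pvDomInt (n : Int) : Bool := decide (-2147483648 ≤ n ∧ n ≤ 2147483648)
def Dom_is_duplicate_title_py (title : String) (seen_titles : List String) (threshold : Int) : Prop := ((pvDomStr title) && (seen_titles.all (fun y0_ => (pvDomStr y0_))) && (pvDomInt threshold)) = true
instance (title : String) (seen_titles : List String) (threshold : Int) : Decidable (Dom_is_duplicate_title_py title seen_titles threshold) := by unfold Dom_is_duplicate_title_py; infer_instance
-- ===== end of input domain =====

-- B replaces A's per-seen-title set intersections by an inverted index (word -> seen-title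
-- indices) and word-major counting over the candidate's words; alternative decomposition.

-- ===== PORT A =====
-- the stop-word set (shared by both Pythons, which contain the identical literal)
def pvStop : List String :=
  ["the","a","an","of","in","for","to","and","or","on","at","by",
   "with","is","are","its","as","that","this"]

-- words(t) = {w.lower().strip(".,:-") for w in t.split() if w.lower() not in stop}
-- (identical helper in Source A and Source B, ported once)
def pvWords (t : String) : PySem.Set String :=
  PySem.Set.ofList
    (((PySem.Str.split₀ t).filter
        (fun w => !(pvStop.contains (PySem.Str.lower w)))).map
      (fun w => PySem.Str.stripChars (PySem.Str.lower w) ".,:-"))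

-- A's loop: for seen in seen_titles: if len(candidate & words(seen)) >= threshold: return True
def pvLoopA (cand : PySem.Set String) (th : Int) : List String → Bool
  | [] => false
  | s :: rest =>
      if th ≤ PySem.Set.len (PySem.Set.inter cand (pvWords s)) then true
      else pvLoopA cand th rest

def is_duplicate_title_py (title : String) (seen_titles : List String) (threshold : Int) : Bool :=
  pvLoopA (pvWords title) threshold seen_titles

-- ===== PORT B =====
-- index.setdefault(w, []).append(idx) for each w in words(seen), idx from enumerate
def pvIndexOf (ts : List String) : PySem.Dict String (List Int) :=
  (PySem.List.enumerate ts).foldl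
    (fun d p => (pvWords p.2).foldl (fun d w => d.modify w [] (fun l => l ++ [p.1])) d)
    PySem.Dict.empty

-- counts[i] += 1 (i always a valid index, coming from enumerate)
def pvIncr (cs : List Int) (i : Int) : List Int :=
  PySem.List.pySetD cs i (PySem.List.pyGetD cs i 0 + 1)

def is_duplicate_title_py_alt (title : String) (seen_titles : List String) (threshold : Int) : Bool :=
  let index := pvIndexOf seen_titles
  let counts :=
    (pvWords title).foldl (fun cs w => (index.getD w []).foldl pvIncr cs)
      (List.replicate seen_titles.length (0 : Int))
  counts.any (fun c => decide (threshold ≤ c))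

-- ===== PRECONDITION & SPEC =====
def Spec_is_duplicate_title_py (title : String) (seen_titles : List String) (threshold : Int) (out : Bool) : Prop := out = is_duplicate_title_py_alt title seen_titles threshold
instance (title : String) (seen_titles : List String) (threshold : Int) (out : Bool) : Decidable (Spec_is_duplicate_title_py title seen_titles threshold out) := by unfold Spec_is_duplicate_title_py; infer_instance

-- ===== CLAIM (what is proved, stated in full; the proofs are below) =====
def Claim_equal_is_duplicate_title_py : Prop := ∀ (title : String) (seen_titles : List String) (threshold : Int), Dom_is_duplicate_title_py title seen_titles threshold → Spec_is_duplicate_title_py title seen_titles threshold (is_duplicate_title_py title seen_titles threshold)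

-- ===== LEMMAS AND PROOFS =====

-- A's early-exit loop is an `any`
theorem pvLoopA_eq_any (cand : PySem.Set String) (th : Int) (ts : List String) :
    pvLoopA cand th ts
      = ts.any (fun s => decide (th ≤ PySem.Set.len (PySem.Set.inter cand (pvWords s)))) := by
  induction ts with
  | nil => rfl
  | cons s rest ih =>
      simp only [pvLoopA, List.any_cons, ih]
      by_cases h : th ≤ PySem.Set.len (PySem.Set.inter cand (pvWords s))
      · rw [if_pos h]; simp; exact Or.inl h
      · rw [if_neg h]; simp; intro hc; exact absurd hc h

theorem pv_foldl_foldl_flatMap {α β γ : Type} (l : List α) (g : α → List β)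
    (f : γ → β → γ) (init : γ) :
    l.foldl (fun acc x => (g x).foldl f acc) init = (l.flatMap g).foldl f init := by
  induction l generalizing init with
  | nil => rfl
  | cons x xs ih => simp [List.flatMap_cons, List.foldl_append, ih]

-- the pair stream the index is built from
def pvPairs (ts : List String) : List (String × Int) :=
  (PySem.List.enumerate ts).flatMap (fun p => (pvWords p.2).map (fun w => (w, p.1)))

theorem pvIndexOf_eq (ts : List String) :
    pvIndexOf ts
      = (pvPairs ts).foldl (fun d q => d.modify q.1 [] (fun l => l ++ [q.2]))
          PySem.Dict.empty := by
  unfold pvIndexOf pvPairs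
  rw [← pv_foldl_foldl_flatMap]
  simp [List.foldl_map]

theorem pvWords_nodup (t : String) : (pvWords t).Nodup := PySem.Set.nodup_ofList _

theorem pv_chunk_filter (ws : List String) (hn : ws.Nodup) (i : Int) (w : String) :
    ((ws.map (fun w' => (w', i))).filter (fun q => q.1 == w)).map (fun q => q.2)
      = if w ∈ ws then [i] else [] := by
  induction ws with
  | nil => simp
  | cons x xs ih =>
      rcases List.nodup_cons.mp hn with ⟨hx, hxs⟩
      simp only [List.map_cons, List.filter_cons]
      by_cases h : x = w
      · have hcond : ((x, i).1 == w) = true := by simp [h]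
        have hnil : (xs.map (fun w' => (w', i))).filter (fun q => q.1 == w) = [] := by
          apply List.filter_eq_nil_iff.mpr
          intro q hq
          rcases List.mem_map.mp hq with ⟨w', hw', rfl⟩
          simp only [beq_iff_eq]
          intro hc
          exact hx (by rw [h]; exact hc ▸ hw')
        simp [hnil, h]
      · have hcond : ((x, i).1 == w) = false := by simp [h]
        simp [hcond, ih hxs, Ne.symm h]

-- the list of seen-title indices the inverted index stores for word w
def pvL (ts : List String) (w : String) : List Int :=
  (PySem.List.enumerate ts).flatMap (fun p => if w ∈ pvWords p.2 then [p.1] else [])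

theorem pv_getD_index (ts : List String) (w : String) :
    (pvIndexOf ts).getD w [] = pvL ts w := by
  rw [pvIndexOf_eq, PySem.Dict.getD_foldl_modify_append]
  unfold pvPairs pvL
  simp only [List.filter_flatMap, List.map_flatMap]
  have hfun : (fun p : Int × String =>
      (((pvWords p.2).map (fun w' => (w', p.1))).filter (fun q => q.1 == w)).map
        (fun q => q.2))
      = (fun p : Int × String => if w ∈ pvWords p.2 then [p.1] else []) := by
    funext p
    exact pv_chunk_filter _ (pvWords_nodup _) _ _
  rw [hfun]
  simp [PySem.Dict.empty, PySem.Dict.getD, PySem.Dict.get?]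

theorem pvL_eq_map_filter (ts : List String) (w : String) :
    pvL ts w = ((PySem.List.enumerate ts).filter
        (fun p => decide (w ∈ pvWords p.2))).map (fun p => p.1) := by
  unfold pvL
  induction (PySem.List.enumerate ts) with
  | nil => simp
  | cons p ps ih =>
      by_cases h : w ∈ pvWords p.2
      · simp [h, ih]
      · simp [h, ih]

theorem pvL_nodup (ts : List String) (w : String) : (pvL ts w).Nodup := by
  rw [pvL_eq_map_filter]
  have h1 := PySem.List.pairwise_lt_enumerate ts 0
  have h2 := h1.filter (fun p => decide (w ∈ pvWords p.2))
  have h3 : (((PySem.List.enumerate ts).filter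
      (fun p => decide (w ∈ pvWords p.2))).map (fun p => p.1)).Pairwise (· < ·) :=
    List.pairwise_map.mpr h2
  exact h3.imp (fun h => ne_of_lt h)

theorem pvL_mem (ts : List String) (w : String) (j : Nat) (hj : j < ts.length) :
    ((j : Int) ∈ pvL ts w) ↔ w ∈ pvWords ts[j] := by
  rw [pvL_eq_map_filter]
  simp only [List.mem_map, List.mem_filter, PySem.List.mem_enumerate_iff]
  constructor
  · rintro ⟨p, ⟨⟨k, hk, rfl⟩, hw⟩, hfst⟩
    simp only [zero_add] at hfst hw
    have : k = j := by exact_mod_cast hfst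
    subst this
    simpa using hw
  · intro hw
    exact ⟨((j : Int), ts[j]), ⟨⟨j, hj, by simp⟩, by simpa using hw⟩, rfl⟩

theorem pvL_count (ts : List String) (w : String) (j : Nat) (hj : j < ts.length) :
    (pvL ts w).count ((j : Int)) = if w ∈ pvWords ts[j] then 1 else 0 := by
  by_cases h : w ∈ pvWords ts[j]
  · rw [if_pos h]
    exact List.count_eq_one_of_mem (pvL_nodup ts w) ((pvL_mem ts w j hj).mpr h)
  · rw [if_neg h]
    exact List.count_eq_zero_of_not_mem (fun hm => h ((pvL_mem ts w j hj).mp hm))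

theorem pvL_elts (ts : List String) (w : String) (i : Int) (hi : i ∈ pvL ts w) :
    ∃ k : Nat, k < ts.length ∧ i = (k : Int) := by
  rw [pvL_eq_map_filter] at hi
  rcases List.mem_map.mp hi with ⟨p, hp, rfl⟩
  rcases (PySem.List.mem_enumerate_iff ts 0 p).mp (List.mem_filter.mp hp).1 with ⟨k, hk, rfl⟩
  exact ⟨k, hk, by simp⟩

theorem pvIncr_cast (cs : List Int) (k : Nat) (hk : k < cs.length) :
    pvIncr cs (k : Int) = cs.set k (cs[k] + 1) := by
  unfold pvIncr
  rw [PySem.List.pySetD, PySem.List.pySet?_natCast cs k _ hk]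
  simp [PySem.List.pyGetD_natCast, List.getElem?_eq_getElem hk]

theorem pv_foldl_incr_length (is : List Int) (cs : List Int)
    (his : ∀ i ∈ is, ∃ k : Nat, k < cs.length ∧ i = (k : Int)) :
    (is.foldl pvIncr cs).length = cs.length := by
  induction is generalizing cs with
  | nil => rfl
  | cons i is ih =>
      rcases his i (List.mem_cons_self ..) with ⟨k, hk, rfl⟩
      rw [List.foldl_cons, pvIncr_cast cs k hk, ih]
      · simp
      · intro i hi
        rcases his i (List.mem_cons_of_mem _ hi) with ⟨k', hk', rfl⟩
        exact ⟨k', by simpa using hk', rfl⟩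

theorem pv_foldl_incr_getD (is : List Int) (cs : List Int) (j : Nat) (hj : j < cs.length)
    (his : ∀ i ∈ is, ∃ k : Nat, k < cs.length ∧ i = (k : Int)) :
    (is.foldl pvIncr cs).getD j 0 = cs.getD j 0 + (is.count ((j : Int)) : Int) := by
  induction is generalizing cs with
  | nil => simp
  | cons i is ih =>
      rcases his i (List.mem_cons_self ..) with ⟨k, hk, rfl⟩
      rw [List.foldl_cons, pvIncr_cast cs k hk]
      have hlen : (cs.set k (cs[k] + 1)).length = cs.length := by simp
      rw [ih _ (by simpa using hj) (by
        intro i hi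
        rcases his i (List.mem_cons_of_mem _ hi) with ⟨k', hk', rfl⟩
        exact ⟨k', by simpa using hk', rfl⟩)]
      rw [List.count_cons]
      rw [List.getD_eq_getElem _ _ (by simpa using hj), List.getD_eq_getElem _ _ hj,
        List.getElem_set]
      by_cases hkj : k = j
      · subst hkj
        simp
        ring
      · have : ((k : Int) == (j : Int)) = false := by
          simp [hkj]
        simp [hkj, this]

theorem pv_getD_elts (ts : List String) (w : String) (cs : List Int)
    (hlen : cs.length = ts.length) :
    ∀ i ∈ (pvIndexOf ts).getD w [], ∃ k : Nat, k < cs.length ∧ i = (k : Int) := by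
  intro i hi
  rw [pv_getD_index] at hi
  rcases pvL_elts ts w i hi with ⟨k, hk, rfl⟩
  exact ⟨k, by omega, rfl⟩

theorem pv_outer_length (cand ts : List String) (cs : List Int)
    (hlen : cs.length = ts.length) :
    (cand.foldl (fun cs w => ((pvIndexOf ts).getD w []).foldl pvIncr cs) cs).length
      = ts.length := by
  induction cand generalizing cs with
  | nil => simpa using hlen
  | cons w ws ih =>
      rw [List.foldl_cons]
      apply ih
      rw [pv_foldl_incr_length _ _ (pv_getD_elts ts w cs hlen)]
      exact hlen

theorem pv_outer_getD (cand ts : List String) (cs : List Int)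
    (hlen : cs.length = ts.length) (j : Nat) (hj : j < ts.length) :
    (cand.foldl (fun cs w => ((pvIndexOf ts).getD w []).foldl pvIncr cs) cs).getD j 0
      = cs.getD j 0 + ((cand.countP (fun w => decide (w ∈ pvWords (ts.getD j "")))) : Int) := by
  induction cand generalizing cs with
  | nil => simp
  | cons w ws ih =>
      rw [List.foldl_cons]
      have hel := pv_getD_elts ts w cs hlen
      have hlen' : (((pvIndexOf ts).getD w []).foldl pvIncr cs).length = ts.length := by
        rw [pv_foldl_incr_length _ _ hel]; exact hlen
      rw [ih _ hlen']
      rw [pv_foldl_incr_getD _ _ j (by omega) hel]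
      rw [pv_getD_index, pvL_count ts w j hj]
      rw [List.countP_cons]
      have hts : ts.getD j "" = ts[j] := List.getD_eq_getElem ts "" hj
      rw [hts]
      by_cases hw : w ∈ pvWords ts[j]
      · simp [hw]; ring
      · simp [hw]

theorem pv_counts_eq (cand ts : List String) :
    (cand.foldl (fun cs w => ((pvIndexOf ts).getD w []).foldl pvIncr cs)
        (List.replicate ts.length (0 : Int)))
      = ts.map (fun s => ((cand.countP (fun w => decide (w ∈ pvWords s))) : Int)) := by
  have hlen0 : (List.replicate ts.length (0 : Int)).length = ts.length := by simp
  apply List.ext_getElem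
  · rw [pv_outer_length _ _ _ hlen0]; simp
  · intro j h1 h2
    have hj : j < ts.length := by simpa using h2
    have hL := pv_outer_getD cand ts _ hlen0 j hj
    rw [List.getD_eq_getElem _ _ h1] at hL
    rw [hL]
    have hts : ts.getD j "" = ts[j] := List.getD_eq_getElem ts "" hj
    rw [hts]
    simp

theorem pv_len_inter_eq_countP (cand : List String) (s : String) :
    PySem.Set.len (PySem.Set.inter cand (pvWords s))
      = ((cand.countP (fun w => decide (w ∈ pvWords s))) : Int) := by
  simp only [PySem.Set.len, PySem.Set.inter]
  congr 1
  simp [PySem.Set.contains, List.countP_eq_length_filter]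

-- ===== VERDICT (by name: the statement is the Claim_ definition above) =====
theorem is_duplicate_title_py_spec : Claim_equal_is_duplicate_title_py := by
  intro title seen th _
  unfold Spec_is_duplicate_title_py is_duplicate_title_py is_duplicate_title_py_alt
  rw [pvLoopA_eq_any]
  simp only []
  rw [pv_counts_eq, List.any_map]
  apply congrArg
  funext s
  simp only [Function.comp]
  rw [pv_len_inter_eq_countP]
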